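-- pv_equiv track=rewrite | github.com/afzalsiddique/problem-solving | Problem_Solving_Python/template/helper.py | nextLessOrEqualIndex
-- ===== SOURCE A (Python) =====
-- def nextLessOrEqualIndex(arr):
--     n=len(arr)
--     indices=sorted(range(n),key=lambda x:arr[x],reverse=True) # only one change -> reverse=True
--     n = len(indices)
--     next_lower_or_equal = [-1]*n
--     st = []
--     for i in range(n):
--         while st and indices[st[-1]] < indices[i]: # no change here
--             next_lower_or_equal[indices[st.pop()]] = indices[i]
--         st.append(i)
--     return next_lower_or_equal
-- ===== SOURCE B (Python) =====
-- def nextLessOrEqualIndex(arr):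
--     n = len(arr)
--     res = []
--     for i in range(n):
--         best = -1
--         for j in range(i + 1, n):
--             if arr[j] <= arr[i] and (best == -1 or arr[j] > arr[best]):
--                 best = j
--         res.append(best)
--     return res
-- ===== Notes on version B (the rewrite author's own statement) =====
-- stated objective: simpler
-- what changed: Replaces the stable-descending-sort + monotonic-stack construction with a direct nested scan that, for each index, picks the rightward neighbour of maximal value <= it (ties to the smallest index).
import Mathlib
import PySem

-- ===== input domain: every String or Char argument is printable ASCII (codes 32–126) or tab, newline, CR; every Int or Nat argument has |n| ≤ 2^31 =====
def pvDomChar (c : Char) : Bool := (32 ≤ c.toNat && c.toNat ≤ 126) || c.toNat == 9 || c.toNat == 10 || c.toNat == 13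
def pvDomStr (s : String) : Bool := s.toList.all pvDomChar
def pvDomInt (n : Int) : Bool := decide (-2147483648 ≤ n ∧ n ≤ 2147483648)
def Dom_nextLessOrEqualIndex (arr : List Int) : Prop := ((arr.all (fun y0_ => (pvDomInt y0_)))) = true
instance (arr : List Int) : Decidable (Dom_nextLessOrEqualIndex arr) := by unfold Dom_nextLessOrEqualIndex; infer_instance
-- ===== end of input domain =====

-- B replaces A's stable-descending-sort + monotonic-stack construction with a direct nested
-- scan (simpler to read, not faster): for each index take the rightward neighbour of maximal
-- value ≤ it, ties to the smallest index.

-- ===== PORT A =====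
-- the inner `while st and indices[st[-1]] < indices[i]` loop; the Python list `st` is kept
-- with its top (Python's st[-1], the append/pop end) at the HEAD of the Lean list
def pvWhileA (indices : List Int) (i : Int) : List Int → List Int → (List Int × List Int)
  | [], next => ([], next)
  | t :: rest, next =>
    if PySem.List.pyGetD indices t 0 < PySem.List.pyGetD indices i 0 then
      pvWhileA indices i rest
        (PySem.List.pySetD next (PySem.List.pyGetD indices t 0) (PySem.List.pyGetD indices i 0))
    else (t :: rest, next)

def nextLessOrEqualIndex (arr : List Int) : List Int :=
  let n : Int := PySem.List.len arr
  let indices := PySem.List.sorted (PySem.List.pyRange 0 n 1) (fun x => PySem.List.pyGetD arr x 0) true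
  let n2 : Int := PySem.List.len indices
  let next_lower_or_equal : List Int := List.replicate n2.toNat (-1)
  (((PySem.List.pyRange 0 n2 1).foldl
      (fun (acc : List Int × List Int) i =>
        let r := pvWhileA indices i acc.2 acc.1
        (r.2, i :: r.1)) (next_lower_or_equal, [])).1)

-- ===== PORT B =====
def nextLessOrEqualIndex_alt (arr : List Int) : List Int :=
  let n : Int := PySem.List.len arr
  (PySem.List.pyRange 0 n 1).foldl (fun res i =>
    res ++ [(PySem.List.pyRange (i+1) n 1).foldl
      (fun best j =>
        if PySem.List.pyGetD arr j 0 ≤ PySem.List.pyGetD arr i 0 ∧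
           (best = -1 ∨ PySem.List.pyGetD arr j 0 > PySem.List.pyGetD arr best 0)
        then j else best) (-1)]) []

-- ===== PRECONDITION & SPEC =====
def Spec_nextLessOrEqualIndex (arr : List Int) (out : List Int) : Prop := out = nextLessOrEqualIndex_alt arr
instance (arr : List Int) (out : List Int) : Decidable (Spec_nextLessOrEqualIndex arr out) := by unfold Spec_nextLessOrEqualIndex; infer_instance

-- ===== CLAIM (what is proved, stated in full; the proofs are below) =====
def Claim_equal_nextLessOrEqualIndex : Prop := ∀ (arr : List Int), Dom_nextLessOrEqualIndex arr → Spec_nextLessOrEqualIndex arr (nextLessOrEqualIndex arr)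

-- ===== LEMMAS AND PROOFS =====

-- value of `indices` at position t (a Python index into the sorted permutation)
def pvV (s : List Int) (t : Int) : Int := PySem.List.pyGetD s t 0
-- the sort key arr[x]
def pvKey (arr : List Int) (x : Int) : Int := PySem.List.pyGetD arr x 0
-- "a comes strictly before b" in A's stable descending sort order
def pvPrec (arr : List Int) (a b : Int) : Prop :=
  pvKey arr b < pvKey arr a ∨ (pvKey arr a = pvKey arr b ∧ a < b)
-- A's sorted index list
def pvS (arr : List Int) : List Int :=
  PySem.List.sorted (PySem.List.pyRange 0 (PySem.List.len arr) 1) (fun x => PySem.List.pyGetD arr x 0) true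
-- value stored by the stack loop for the element at position k of s:
-- the first later entry of s that is a larger index, else -1
def pvFg (s : List Int) (k : Int) : Int :=
  ((s.drop (k.toNat+1)).find? (fun w => decide (pvV s k < w))).getD (-1)
-- B's inner loop
def pvBest (arr : List Int) (i : Int) : Int :=
  (PySem.List.pyRange (i+1) (PySem.List.len arr) 1).foldl
    (fun best j =>
      if PySem.List.pyGetD arr j 0 ≤ PySem.List.pyGetD arr i 0 ∧
         (best = -1 ∨ PySem.List.pyGetD arr j 0 > PySem.List.pyGetD arr best 0)
      then j else best) (-1)
-- the common specification both sides are reduced to: b is -1 and no right neighbour of p has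
-- value ≤ arr[p], or b is the ≺-least such neighbour
def pvIsBest (arr : List Int) (p b : Int) : Prop :=
  (b = -1 ∧ ∀ q : Int, p < q → q < (arr.length : Int) → ¬ pvKey arr q ≤ pvKey arr p) ∨
  (p < b ∧ b < (arr.length : Int) ∧ pvKey arr b ≤ pvKey arr p ∧
   ∀ q : Int, p < q → q < (arr.length : Int) → pvKey arr q ≤ pvKey arr p → q ≠ b → pvPrec arr b q)
-- the stack-loop invariant (next array contents, stack contents, stack order)
def pvInv (s : List Int) (i : Int) (next st : List Int) : Prop :=
  next.length = s.length ∧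
  (∀ t ∈ st, 0 ≤ t ∧ t < i) ∧
  st.Pairwise (fun a b => b < a ∧ pvV s a ≤ pvV s b) ∧
  (∀ k : Int, 0 ≤ k → k < i → (k ∈ st ↔ ∀ m : Int, k < m → m < i → pvV s m ≤ pvV s k)) ∧
  (∀ k : Int, 0 ≤ k → k < (s.length : Int) →
     next.getD (pvV s k).toNat 0 = if k < i ∧ k ∉ st then pvFg s k else -1)

theorem pvV_eq_getElem (s : List Int) (k : Int) (h0 : 0 ≤ k) (h1 : k < (s.length : Int)) :
    pvV s k = s[k.toNat]'(by omega) := by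
  unfold pvV
  rw [PySem.List.pyGetD_eq_getElem s 0 h0 (by simpa using h1)]

theorem pvV_range (s : List Int) (hs : ∀ x ∈ s, 0 ≤ x ∧ x < (s.length : Int))
    (k : Int) (h0 : 0 ≤ k) (h1 : k < (s.length : Int)) :
    0 ≤ pvV s k ∧ pvV s k < (s.length : Int) := by
  rw [pvV_eq_getElem s k h0 h1]
  exact hs _ (List.getElem_mem _)

theorem pvV_inj (s : List Int) (hnd : s.Nodup) (k k' : Int)
    (h0 : 0 ≤ k) (h1 : k < (s.length : Int)) (h0' : 0 ≤ k') (h1' : k' < (s.length : Int))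
    (hne : k ≠ k') : pvV s k ≠ pvV s k' := by
  rw [pvV_eq_getElem s k h0 h1, pvV_eq_getElem s k' h0' h1']
  intro hEq
  exact hne (by
    have := (List.Nodup.getElem_inj_iff hnd).mp hEq
    omega)

-- ---- stability of A's sort: the sorted list is strictly ordered by pvPrec ----
theorem pvInsertBy_pairwise (arr : List Int) (x : Int) :
    ∀ (acc : List Int), acc.Pairwise (pvPrec arr) → (∀ y ∈ acc, y < x) →
    (PySem.List.insertBy (fun a b => decide (pvKey arr b < pvKey arr a)) x acc).Pairwise (pvPrec arr)
  | [], _, _ => by simp [PySem.List.insertBy]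
  | y :: ys, h, hlt => by
    rw [List.pairwise_cons] at h
    by_cases hc : pvKey arr y < pvKey arr x
    · have : PySem.List.insertBy (fun a b => decide (pvKey arr b < pvKey arr a)) x (y :: ys)
        = x :: y :: ys := by simp [PySem.List.insertBy, hc]
      rw [this, List.pairwise_cons]
      refine ⟨?_, by rw [List.pairwise_cons]; exact h⟩
      intro z hz
      rcases List.mem_cons.mp hz with rfl | hz
      · exact Or.inl hc
      · rcases h.1 z hz with h1 | h1
        · exact Or.inl (lt_trans h1 hc)
        · exact Or.inl (h1.1 ▸ hc)
    · have : PySem.List.insertBy (fun a b => decide (pvKey arr b < pvKey arr a)) x (y :: ys)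
        = y :: PySem.List.insertBy (fun a b => decide (pvKey arr b < pvKey arr a)) x ys := by
        simp [PySem.List.insertBy, hc]
      rw [this, List.pairwise_cons]
      constructor
      · intro z hz
        rw [PySem.List.insertBy_mem_iff] at hz
        rcases hz with rfl | hz
        · have hyx : y < z := hlt y (List.mem_cons_self ..)
          rcases lt_or_eq_of_le (not_lt.mp hc) with h1 | h1
          · exact Or.inl h1
          · exact Or.inr ⟨h1.symm, hyx⟩
        · exact h.1 z hz
      · exact pvInsertBy_pairwise arr x ys h.2 (fun y hy => hlt y (List.mem_cons_of_mem _ hy))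

theorem pvFoldl_insertBy_pairwise (arr : List Int) :
    ∀ (xs acc : List Int), xs.Pairwise (· < ·) → acc.Pairwise (pvPrec arr) →
    (∀ y ∈ acc, ∀ x ∈ xs, y < x) →
    (xs.foldl (fun acc x => PySem.List.insertBy (fun a b => decide (pvKey arr b < pvKey arr a)) x acc) acc).Pairwise (pvPrec arr)
  | [], acc, _, hacc, _ => hacc
  | x :: xs, acc, hxs, hacc, hlt => by
    rw [List.foldl_cons]
    rw [List.pairwise_cons] at hxs
    refine pvFoldl_insertBy_pairwise arr xs _ hxs.2
      (pvInsertBy_pairwise arr x acc hacc (fun y hy => hlt y hy x (List.mem_cons_self ..))) ?_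
    intro y hy z hz
    rw [PySem.List.insertBy_mem_iff] at hy
    rcases hy with rfl | hy
    · exact hxs.1 z hz
    · exact hlt y hy z (List.mem_cons_of_mem _ hz)

theorem pvS_pairwise (arr : List Int) : (pvS arr).Pairwise (pvPrec arr) := by
  unfold pvS
  rw [PySem.List.sorted_rev_eq_foldl_insertBy]
  exact pvFoldl_insertBy_pairwise arr _ [] (PySem.List.pairwise_lt_pyRange_one 0 _)
    List.Pairwise.nil (by simp)

theorem pvS_perm (arr : List Int) : (pvS arr).Perm (PySem.List.pyRange 0 (PySem.List.len arr) 1) :=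
  PySem.List.sorted_perm _ _ _

theorem pvS_mem (arr : List Int) (x : Int) : x ∈ pvS arr ↔ 0 ≤ x ∧ x < arr.length := by
  rw [(pvS_perm arr).mem_iff, PySem.List.mem_pyRange_one]
  simp

theorem pvS_nodup (arr : List Int) : (pvS arr).Nodup :=
  (pvS_perm arr).nodup_iff.mpr (PySem.List.nodup_pyRange_one 0 _)

theorem pvS_length (arr : List Int) : (pvS arr).length = arr.length := by
  rw [(pvS_perm arr).length_eq, PySem.List.length_pyRange_one]
  simp

-- ---- the while loop pops a takeWhile prefix and writes the popped cells ----
theorem pvWhileA_eq (s : List Int) (i : Int) : ∀ (st next : List Int),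
    pvWhileA s i st next =
      (st.dropWhile (fun t => decide (pvV s t < pvV s i)),
       (st.takeWhile (fun t => decide (pvV s t < pvV s i))).foldl
         (fun nx t => PySem.List.pySetD nx (pvV s t) (pvV s i)) next)
  | [], next => by simp [pvWhileA]
  | t :: rest, next => by
    by_cases hc : pvV s t < pvV s i
    · simp only [pvWhileA, pvV] at hc ⊢
      rw [if_pos hc, pvWhileA_eq s i rest _]
      simp [List.dropWhile, List.takeWhile, hc, pvV]
    · simp only [pvWhileA, pvV] at hc ⊢
      rw [if_neg hc]
      simp [List.dropWhile, List.takeWhile, hc]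

theorem pvWrites_length (f : Int → Int) (cur : Int) :
    ∀ (pop next : List Int), (∀ t ∈ pop, 0 ≤ f t ∧ f t < next.length) →
    (pop.foldl (fun nx t => PySem.List.pySetD nx (f t) cur) next).length = next.length
  | [], next, _ => rfl
  | t :: rest, next, h => by
    rw [List.foldl_cons]
    have h0 := (h t (List.mem_cons_self ..)).1
    rw [pvWrites_length f cur rest _ ?_]
    · rw [PySem.List.pySetD_of_nonneg _ _ h0, List.length_set]
    · intro u hu
      rw [PySem.List.pySetD_of_nonneg _ _ h0, List.length_set]
      exact h u (List.mem_cons_of_mem _ hu)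

theorem pvWrites_getD (f : Int → Int) (cur : Int) :
    ∀ (pop next : List Int) (p : Nat), (∀ t ∈ pop, 0 ≤ f t ∧ f t < next.length) →
    (pop.foldl (fun nx t => PySem.List.pySetD nx (f t) cur) next).getD p 0 =
      if ∃ t ∈ pop, (f t).toNat = p then cur else next.getD p 0
  | [], next, p, _ => by simp
  | t :: rest, next, p, h => by
    rw [List.foldl_cons]
    have h0 := h t (List.mem_cons_self ..)
    have hlen : (PySem.List.pySetD next (f t) cur).length = next.length := by
      rw [PySem.List.pySetD_of_nonneg _ _ h0.1, List.length_set]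
    rw [pvWrites_getD f cur rest _ p (by rw [hlen]; exact fun u hu => h u (List.mem_cons_of_mem _ hu))]
    by_cases hex : ∃ u ∈ rest, (f u).toNat = p
    · rw [if_pos hex, if_pos ⟨hex.choose, List.mem_cons_of_mem _ hex.choose_spec.1, hex.choose_spec.2⟩]
    · rw [if_neg hex]
      rw [PySem.List.pySetD_of_nonneg _ _ h0.1]
      by_cases hp : (f t).toNat = p
      · rw [if_pos ⟨t, List.mem_cons_self .., hp⟩]
        subst hp
        simp only [List.getD, List.getElem?_set]
        have : (f t).toNat < next.length := by omega
        simp [this]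
      · rw [if_neg (by rintro ⟨u, hu, hfu⟩; rcases List.mem_cons.mp hu with rfl | hu; exact hp hfu; exact hex ⟨u, hu, hfu⟩)]
        simp only [List.getD, List.getElem?_set]
        rw [if_neg (by omega)]

theorem pvFind_first {α : Type} (P : α → Bool) :
    ∀ (l : List α) (j : Nat) (x : α), l[j]? = some x →
    (∀ (j2 : Nat), j2 < j → ∀ y, l[j2]? = some y → ¬ P y) → P x →
    l.find? P = some x
  | [], j, x, hx, _, _ => by simp at hx
  | a :: l, 0, x, hx, _, h2 => by
    simp only [List.getElem?_cons_zero, Option.some.injEq] at hx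
    subst hx
    rw [List.find?_cons_of_pos h2]
  | a :: l, j+1, x, hx, h1, h2 => by
    have ha : ¬ P a := h1 0 (by omega) a (by simp)
    rw [List.find?_cons_of_neg ha]
    exact pvFind_first P l j x (by simpa using hx)
      (fun j2 hj2 y hy => h1 (j2+1) (by omega) y (by simpa using hy)) h2

-- ---- one outer-loop step preserves the invariant ----
theorem pvStep (s : List Int) (hs : ∀ x ∈ s, 0 ≤ x ∧ x < (s.length : Int)) (hnd : s.Nodup)
    (i : Int) (h0 : 0 ≤ i) (hin : i < (s.length : Int)) (next st : List Int)
    (h : pvInv s i next st) :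
    pvInv s (i+1) (pvWhileA s i st next).2 (i :: (pvWhileA s i st next).1) := by
  obtain ⟨hlen, hb, hpw, hd, he⟩ := h
  rw [pvWhileA_eq]
  set P : Int → Bool := fun t => decide (pvV s t < pvV s i) with hP
  set tk := st.takeWhile P with htk
  set dp := st.dropWhile P with hdp
  have hsplit : tk ++ dp = st := List.takeWhile_append_dropWhile
  have htkmem : ∀ t ∈ tk, t ∈ st := fun t ht => (List.takeWhile_sublist P).mem ht
  have hdpmem : ∀ t ∈ dp, t ∈ st := fun t ht => (List.dropWhile_sublist P).mem ht
  have htkP : ∀ t ∈ tk, pvV s t < pvV s i := by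
    intro t ht
    have := List.mem_takeWhile_imp ht
    simpa [hP] using this
  have hdpge : ∀ t ∈ dp, pvV s i ≤ pvV s t := by
    have : ∀ (l : List Int), l.Pairwise (fun a b => b < a ∧ pvV s a ≤ pvV s b) →
        ∀ t ∈ l.dropWhile P, pvV s i ≤ pvV s t := by
      intro l hl
      induction l with
      | nil => simp
      | cons x r ih =>
        rw [List.pairwise_cons] at hl
        by_cases hx : P x
        · rw [List.dropWhile_cons_of_pos hx]
          exact ih hl.2
        · rw [List.dropWhile_cons_of_neg hx]
          intro t ht
          have hxi : pvV s i ≤ pvV s x := by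
            simp only [hP, decide_eq_true_eq] at hx
            omega
          rcases List.mem_cons.mp ht with rfl | ht
          · exact hxi
          · exact le_trans hxi (hl.1 t ht).2
    exact this st hpw
  have hdppw : dp.Pairwise (fun a b => b < a ∧ pvV s a ≤ pvV s b) :=
    hpw.sublist (List.dropWhile_sublist P)
  have hstnd : st.Nodup := hpw.imp (fun h => ne_of_gt h.1)
  have hmem_split : ∀ (k : Int), k ∈ st ↔ (k ∈ tk ∨ k ∈ dp) := by
    intro k; rw [← hsplit, List.mem_append]
  refine ⟨?_, ?_, ?_, ?_, ?_⟩
  · simp only []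
    rw [pvWrites_length]
    · exact hlen
    · intro t ht
      have hst := htkmem t ht
      have := hb t hst
      have := pvV_range s hs t this.1 (by omega)
      omega
  · intro t ht
    rcases List.mem_cons.mp ht with rfl | ht
    · omega
    · have := hb t (hdpmem t ht); omega
  · rw [List.pairwise_cons]
    exact ⟨fun t ht => ⟨(hb t (hdpmem t ht)).2, hdpge t ht⟩, hdppw⟩
  · intro k hk0 hki
    by_cases hkeq : k = i
    · subst hkeq
      simp only [List.mem_cons, true_or, true_iff]
      intro m hm1 hm2; omega
    · have hki' : k < i := by omega
      rw [List.mem_cons]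
      constructor
      · rintro (rfl | hkdp)
        · omega
        · intro m hm1 hm2
          by_cases hmi : m = i
          · subst hmi
            exact hdpge k hkdp
          · exact ((hd k hk0 hki').mp (hdpmem k hkdp)) m hm1 (by omega)
      · intro hall
        right
        have hkst : k ∈ st := (hd k hk0 hki').mpr (fun m hm1 hm2 => hall m hm1 (by omega))
        rcases (hmem_split k).mp hkst with hktk | hkdp
        · exfalso
          have := htkP k hktk
          have := hall i hki' (by omega)
          omega
        · exact hkdp
  · intro k hk0 hkn
    simp only []
    have hvk := pvV_range s hs k hk0 hkn
    rw [pvWrites_getD]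
    swap
    · intro t ht
      have hst := htkmem t ht
      have hbt := hb t hst
      have := pvV_range s hs t hbt.1 (by omega)
      omega
    have hcond : (∃ t ∈ tk, (pvV s t).toNat = (pvV s k).toNat) ↔ k ∈ tk := by
      constructor
      · rintro ⟨t, ht, htoNat⟩
        have hbt := hb t (htkmem t ht)
        have hvt := pvV_range s hs t hbt.1 (by omega)
        have hveq : pvV s t = pvV s k := by omega
        by_cases hne : t = k
        · subst hne; exact ht
        · exact absurd hveq (pvV_inj s hnd t k hbt.1 (by omega) hk0 hkn hne)
      · intro hk
        exact ⟨k, hk, rfl⟩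
    by_cases hktk : k ∈ tk
    · rw [if_pos (hcond.mpr hktk)]
      have hkst : k ∈ st := htkmem k hktk
      have hbk := hb k hkst
      have hnotdp : k ∉ dp := by
        intro hkdp
        have hnd2 : (tk ++ dp).Nodup := hsplit ▸ hstnd
        rw [List.nodup_append] at hnd2
        exact hnd2.2.2 k hktk k hkdp rfl
      rw [if_pos ⟨by omega, by
        intro hcon
        rcases List.mem_cons.mp hcon with rfl | hcon
        · omega
        · exact hnotdp hcon⟩]
      have hall : ∀ m : Int, k < m → m < i → pvV s m ≤ pvV s k :=
        (hd k hbk.1 hbk.2).mp hkst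
      have hki : pvV s k < pvV s i := htkP k hktk
      unfold pvFg
      have hllen : (s.drop (k.toNat+1)).length = s.length - (k.toNat+1) := by
        rw [List.length_drop]
      have hidx : k.toNat + 1 + (i.toNat - k.toNat - 1) = i.toNat := by omega
      have hgetj : (s.drop (k.toNat+1))[i.toNat - k.toNat - 1]? = some (pvV s i) := by
        rw [List.getElem?_drop, hidx, List.getElem?_eq_getElem (by omega),
            pvV_eq_getElem s i h0 hin]
      rw [pvFind_first _ _ (i.toNat - k.toNat - 1) (pvV s i) hgetj ?pvh1 ?pvh2]
      · rfl
      case pvh1 =>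
        intro j2 hj2 y hy
        rw [List.getElem?_drop, List.getElem?_eq_getElem (by omega)] at hy
        have hy' : y = pvV s ((k.toNat + 1 + j2 : Nat) : Int) := by
          rw [pvV_eq_getElem s _ (by omega) (by push_cast; omega)]
          simp only [Option.some.injEq] at hy
          rw [← hy]
          congr 1
        subst hy'
        have := hall ((k.toNat + 1 + j2 : Nat) : Int) (by push_cast; omega) (by push_cast; omega)
        simp only [decide_eq_true_eq, not_lt]
        omega
      case pvh2 => simpa using hki
    · rw [if_neg (fun hcon => hktk (hcond.mp hcon))]
      rw [he k hk0 hkn]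
      have hmem : k ∈ st ↔ k ∈ dp := by
        rw [hmem_split k]
        constructor
        · rintro (h1 | h1); exact absurd h1 hktk; exact h1
        · exact Or.inr
      by_cases hklt : k < i
      · have hne : k ≠ i := by omega
        have : (k ∈ st) ↔ (k ∈ i :: dp) := by
          rw [hmem, List.mem_cons]
          constructor
          · exact Or.inr
          · rintro (rfl | h1); omega; exact h1
        by_cases hkst : k ∈ st
        · rw [if_neg (by intro hcon; exact hcon.2 hkst), if_neg (by intro hcon; exact hcon.2 (this.mp hkst))]
        · rw [if_pos ⟨hklt, hkst⟩, if_pos ⟨by omega, fun hcon => hkst (this.mpr hcon)⟩]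
      · by_cases hkeq : k = i
        · subst hkeq
          rw [if_neg (by omega), if_neg (by intro hcon; exact hcon.2 (List.mem_cons_self ..))]
        · rw [if_neg (by omega), if_neg (by omega)]

-- ---- the invariant holds after the whole loop ----
theorem pvLoop (s : List Int) (hs : ∀ x ∈ s, 0 ≤ x ∧ x < (s.length : Int)) (hnd : s.Nodup) :
    ∀ (i : Int), 0 ≤ i → i ≤ (s.length : Int) →
    pvInv s i
      (((PySem.List.pyRange 0 i 1).foldl
        (fun (acc : List Int × List Int) j =>
          let r := pvWhileA s j acc.2 acc.1
          (r.2, j :: r.1))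
        (List.replicate s.length (-1), [])).1)
      (((PySem.List.pyRange 0 i 1).foldl
        (fun (acc : List Int × List Int) j =>
          let r := pvWhileA s j acc.2 acc.1
          (r.2, j :: r.1))
        (List.replicate s.length (-1), [])).2) := by
  intro i hi0
  induction i, hi0 using Int.le_induction with
  | base =>
    intro _
    rw [PySem.List.pyRange_one_eq_nil (by omega)]
    refine ⟨by simp, by simp, by simp, by intro k hk0 hk1; omega, ?_⟩
    intro k hk0 hkn
    rw [if_neg (by omega)]
    have := pvV_range s hs k hk0 hkn
    simp only [List.foldl_nil, List.getD]
    rw [List.getElem?_replicate, if_pos (by omega)]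
    rfl
  | succ i hi0 ih =>
    intro hle
    rw [PySem.List.pyRange_one_succ_right (by omega), List.foldl_append, List.foldl_cons,
        List.foldl_nil]
    exact pvStep s hs hnd i hi0 (by omega) _ _ (ih (by omega))

-- ---- extraction: the final next array holds pvFg at every position ----
theorem pvFinal (s : List Int) (hs : ∀ x ∈ s, 0 ≤ x ∧ x < (s.length : Int)) (hnd : s.Nodup)
    (k : Int) (hk0 : 0 ≤ k) (hkn : k < (s.length : Int)) :
    (((PySem.List.pyRange 0 (s.length : Int) 1).foldl
        (fun (acc : List Int × List Int) j =>
          let r := pvWhileA s j acc.2 acc.1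
          (r.2, j :: r.1))
        (List.replicate s.length (-1), [])).1).getD (pvV s k).toNat 0 = pvFg s k := by
  obtain ⟨hlen, hb, hpw, hd, he⟩ := pvLoop s hs hnd (s.length : Int) (by omega) le_rfl
  rw [he k hk0 hkn]
  by_cases hkst : k ∈ (((PySem.List.pyRange 0 (s.length : Int) 1).foldl
        (fun (acc : List Int × List Int) j =>
          let r := pvWhileA s j acc.2 acc.1
          (r.2, j :: r.1))
        (List.replicate s.length (-1), [])).2)
  · rw [if_neg (fun hcon => hcon.2 hkst)]
    have hall := (hd k hk0 hkn).mp hkst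
    unfold pvFg
    rw [List.find?_eq_none.mpr ?_, Option.getD_none]
    intro x hx
    rw [List.mem_iff_getElem?] at hx
    obtain ⟨j2, hj2⟩ := hx
    have hj2len : j2 < (s.drop (k.toNat+1)).length := by
      by_contra hcon
      rw [List.getElem?_eq_none_iff.mpr (by omega)] at hj2
      simp at hj2
    rw [List.getElem?_drop, List.getElem?_eq_getElem (by rw [List.length_drop] at hj2len; omega)] at hj2
    have hxv : x = pvV s ((k.toNat + 1 + j2 : Nat) : Int) := by
      rw [pvV_eq_getElem s _ (by omega) (by rw [List.length_drop] at hj2len; push_cast; omega)]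
      simp only [Option.some.injEq] at hj2
      rw [← hj2]
      congr 1
    subst hxv
    have := hall ((k.toNat + 1 + j2 : Nat) : Int) (by push_cast; omega)
      (by rw [List.length_drop] at hj2len; push_cast; omega)
    simp only [decide_eq_true_eq, not_lt]
    omega
  · rw [if_pos ⟨hkn, hkst⟩]

-- ---- B's inner loop computes the pvIsBest value ----
theorem pvBest_inv (arr : List Int) (p : Int) (hp : 0 ≤ p) :
    ∀ (bound : Int), p + 1 ≤ bound →
    (let b := (PySem.List.pyRange (p+1) bound 1).foldl
      (fun best j =>
        if PySem.List.pyGetD arr j 0 ≤ PySem.List.pyGetD arr p 0 ∧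
           (best = -1 ∨ PySem.List.pyGetD arr j 0 > PySem.List.pyGetD arr best 0)
        then j else best) (-1)
     (b = -1 ∧ ∀ q : Int, p < q → q < bound → ¬ pvKey arr q ≤ pvKey arr p) ∨
     (p < b ∧ b < bound ∧ pvKey arr b ≤ pvKey arr p ∧
       ∀ q : Int, p < q → q < bound → pvKey arr q ≤ pvKey arr p → q ≠ b → pvPrec arr b q)) := by
  intro bound hb
  induction bound, hb using Int.le_induction with
  | base =>
    rw [PySem.List.pyRange_one_eq_nil (by omega)]
    exact Or.inl ⟨rfl, fun q h1 h2 => by omega⟩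
  | succ bound hb ih =>
    rw [PySem.List.pyRange_one_succ_right (by omega), List.foldl_append, List.foldl_cons,
        List.foldl_nil]
    simp only at ih ⊢
    set b := (PySem.List.pyRange (p+1) bound 1).foldl
      (fun best j =>
        if PySem.List.pyGetD arr j 0 ≤ PySem.List.pyGetD arr p 0 ∧
           (best = -1 ∨ PySem.List.pyGetD arr j 0 > PySem.List.pyGetD arr best 0)
        then j else best) (-1) with hbdef
    by_cases hc : PySem.List.pyGetD arr bound 0 ≤ PySem.List.pyGetD arr p 0 ∧
         (b = -1 ∨ PySem.List.pyGetD arr bound 0 > PySem.List.pyGetD arr b 0)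
    · rw [if_pos hc]
      right
      refine ⟨by omega, by omega, hc.1, ?_⟩
      intro q h1 h2 h3 h4
      rcases ih with ⟨hb1, hb2⟩ | ⟨hb1, hb2, hb3, hb4⟩
      · exfalso
        exact hb2 q h1 (by omega) h3
      · have hcb : PySem.List.pyGetD arr b 0 < PySem.List.pyGetD arr bound 0 := by
          rcases hc.2 with h | h
          · omega
          · exact h
        by_cases hqb : q = b
        · subst hqb
          exact Or.inl hcb
        · have := hb4 q h1 (by omega) h3 hqb
          rcases this with h | h
          · exact Or.inl (by unfold pvKey at *; omega)
          · exact Or.inl (by unfold pvKey at *; omega)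
    · rw [if_neg hc]
      rcases ih with ⟨hb1, hb2⟩ | ⟨hb1, hb2, hb3, hb4⟩
      · left
        refine ⟨hb1, ?_⟩
        intro q h1 h2 h3
        by_cases hq : q = bound
        · subst hq
          push_neg at hc
          exact absurd hb1 (hc h3).1
        · exact hb2 q h1 (by omega) h3
      · right
        refine ⟨hb1, by omega, hb3, ?_⟩
        intro q h1 h2 h3 h4
        by_cases hq : q = bound
        · subst hq
          push_neg at hc
          have hle : PySem.List.pyGetD arr q 0 ≤ PySem.List.pyGetD arr b 0 := (hc h3).2
          rcases lt_or_eq_of_le hle with h | h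
          · exact Or.inl h
          · exact Or.inr ⟨by unfold pvKey; omega, by omega⟩
        · exact hb4 q h1 (by omega) h3 h4

theorem pvBest_isBest (arr : List Int) (p : Int) (hp : 0 ≤ p) (hpn : p < (arr.length : Int)) :
    pvIsBest arr p (pvBest arr p) := by
  have h := pvBest_inv arr p hp (arr.length : Int) (by omega)
  simp only at h
  unfold pvIsBest pvBest
  rw [PySem.List.len_eq]
  exact h

-- ---- the two specifications pick a unique value ----
theorem pvIsBest_unique (arr : List Int) (p b1 b2 : Int) (hp : 0 ≤ p)
    (h1 : pvIsBest arr p b1) (h2 : pvIsBest arr p b2) : b1 = b2 := by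
  rcases h1 with ⟨e1, n1⟩ | ⟨c1, c2, c3, c4⟩
  · rcases h2 with ⟨e2, _⟩ | ⟨d1, d2, d3, _⟩
    · rw [e1, e2]
    · exact absurd d3 (n1 b2 d1 d2)
  · rcases h2 with ⟨e2, n2⟩ | ⟨d1, d2, d3, d4⟩
    · exact absurd c3 (n2 b1 c1 c2)
    · by_contra hne
      have p1 := c4 b2 d1 d2 d3 (fun h => hne h.symm)
      have p2 := d4 b1 c1 c2 c3 hne
      unfold pvPrec at p1 p2
      rcases p1 with h | h <;> rcases p2 with h' | h' <;> omega

-- ---- A's stack answer satisfies pvIsBest too ----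
theorem pvFg_isBest (arr s : List Int) (hlen : s.length = arr.length)
    (hmem : ∀ x : Int, x ∈ s ↔ 0 ≤ x ∧ x < (arr.length : Int)) (hnd : s.Nodup)
    (hpw : s.Pairwise (pvPrec arr))
    (k : Int) (hk0 : 0 ≤ k) (hkn : k < (s.length : Int)) :
    pvIsBest arr (pvV s k) (pvFg s k) := by
  have hpg := List.pairwise_iff_getElem.mp hpw
  have hpv : pvV s k = s[k.toNat]'(by omega) := pvV_eq_getElem s k hk0 hkn
  set p := pvV s k with hpdef
  have F1 : ∀ q : Int, p < q → q < (arr.length : Int) → pvKey arr q ≤ pvKey arr p →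
      q ∈ s.drop (k.toNat+1) := by
    intro q h1 h2 h3
    have hp0 : 0 ≤ p := by
      rcases (hmem p).mp (hpv ▸ List.getElem_mem _) with ⟨h, _⟩
      exact h
    have hq : q ∈ s := (hmem q).mpr ⟨by omega, h2⟩
    obtain ⟨m, hm, hqm⟩ := List.mem_iff_getElem.mp hq
    have hmk : m ≠ k.toNat := by
      intro hEq
      subst hEq
      have : p = q := hpv.trans hqm
      omega
    rcases Nat.lt_or_ge m k.toNat with hlt | hge
    · exfalso
      have := hpg m k.toNat hm (by omega) hlt
      rw [hqm] at this
      rw [← hpv] at this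
      rcases this with h | h
      · omega
      · omega
    · have hgt : k.toNat + 1 ≤ m := by omega
      have : (s.drop (k.toNat+1))[m - (k.toNat+1)]'(by rw [List.length_drop]; omega) = q := by
        rw [List.getElem_drop, ← hqm]
        congr 1
        omega
      exact this ▸ List.getElem_mem _
  have F2 : ∀ x ∈ s.drop (k.toNat+1), pvPrec arr p x ∧ 0 ≤ x ∧ x < (arr.length : Int) := by
    intro x hx
    obtain ⟨j, hj, hxj⟩ := List.mem_iff_getElem.mp hx
    have hjlen : k.toNat + 1 + j < s.length := by
      rw [List.length_drop] at hj; omega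
    have hxval : x = s[k.toNat + 1 + j]'hjlen := by
      rw [← hxj, List.getElem_drop]
    constructor
    · have := hpg k.toNat (k.toNat + 1 + j) (by omega) hjlen
      rw [← hpv, ← hxval] at this
      exact this (by omega)
    · have : x ∈ s := (List.drop_subset _ _) hx
      exact ((hmem x).mp this).elim (fun a b => ⟨a, b⟩)
  cases hF : (s.drop (k.toNat+1)).find? (fun w => decide (p < w)) with
  | none =>
    left
    constructor
    · unfold pvFg
      rw [← hpdef, hF]
      rfl
    · intro q h1 h2 h3
      have hq := F1 q h1 h2 h3
      have := List.find?_eq_none.mp hF q hq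
      simp only [decide_eq_true_eq] at this
      omega
  | some x =>
    right
    have hfind := hF
    rw [List.find?_eq_some_iff_append] at hF
    obtain ⟨hPx, as, bs, hsplit, has⟩ := hF
    have hxmem : x ∈ s.drop (k.toNat+1) := by
      rw [hsplit]
      exact List.mem_append.mpr (Or.inr (List.mem_cons_self ..))
    have hpx : p < x := by simpa using hPx
    obtain ⟨hprec, hx0, hxn⟩ := F2 x hxmem
    have hkey : pvKey arr x ≤ pvKey arr p := by
      rcases hprec with h | h
      · exact le_of_lt h
      · exact le_of_eq h.1.symm
    have hfg : pvFg s k = x := by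
      unfold pvFg
      rw [← hpdef, hfind]
      rfl
    rw [hfg]
    refine ⟨hpx, hxn, hkey, ?_⟩
    intro q h1 h2 h3 h4
    have hq := F1 q h1 h2 h3
    rw [hsplit] at hq
    rcases List.mem_append.mp hq with hq | hq
    · exfalso
      have := has q hq
      simp only [Bool.not_eq_eq_eq_not, Bool.not_true, decide_eq_false_iff_not] at this
      omega
    · rcases List.mem_cons.mp hq with rfl | hq
      · exact absurd rfl h4
      · have hdp : (s.drop (k.toNat+1)).Pairwise (pvPrec arr) :=
          hpw.sublist (List.drop_sublist _ _)
        rw [hsplit] at hdp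
        have := (List.pairwise_append.mp hdp).2.1
        rw [List.pairwise_cons] at this
        exact this.1 q hq

-- ---- glue: the two ports in terms of the analysed expressions ----
theorem portA_eq (arr : List Int) :
    nextLessOrEqualIndex arr =
      (((PySem.List.pyRange 0 ((pvS arr).length : Int) 1).foldl
        (fun (acc : List Int × List Int) j =>
          let r := pvWhileA (pvS arr) j acc.2 acc.1
          (r.2, j :: r.1))
        (List.replicate (pvS arr).length (-1), [])).1) := by
  unfold nextLessOrEqualIndex pvS
  simp only [PySem.List.len_eq, Int.toNat_natCast]

theorem portB_eq (arr : List Int) :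
    nextLessOrEqualIndex_alt arr = (PySem.List.pyRange 0 (PySem.List.len arr) 1).map (pvBest arr) := by
  unfold nextLessOrEqualIndex_alt
  rw [PySem.List.foldl_append_singleton_eq_map
    (f := fun i => (PySem.List.pyRange (i+1) (PySem.List.len arr) 1).foldl
      (fun best j =>
        if PySem.List.pyGetD arr j 0 ≤ PySem.List.pyGetD arr i 0 ∧
           (best = -1 ∨ PySem.List.pyGetD arr j 0 > PySem.List.pyGetD arr best 0)
        then j else best) (-1))]
  rw [List.nil_append]
  rfl

theorem pvS_hs (arr : List Int) : ∀ x ∈ pvS arr, 0 ≤ x ∧ x < ((pvS arr).length : Int) := by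
  intro x hx
  have := (pvS_mem arr x).mp hx
  rw [pvS_length]
  exact this

theorem portA_length (arr : List Int) : (nextLessOrEqualIndex arr).length = arr.length := by
  rw [portA_eq]
  obtain ⟨hlen, _, _, _, _⟩ :=
    pvLoop (pvS arr) (pvS_hs arr) (pvS_nodup arr) ((pvS arr).length : Int) (by omega) le_rfl
  rw [hlen, pvS_length]

theorem portB_length (arr : List Int) : (nextLessOrEqualIndex_alt arr).length = arr.length := by
  rw [portB_eq, List.length_map, PySem.List.length_pyRange_one]
  simp

-- ---- the main equivalence ----
theorem pvMain (arr : List Int) : nextLessOrEqualIndex arr = nextLessOrEqualIndex_alt arr := by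
  apply List.ext_getElem (by rw [portA_length, portB_length])
  intro p0 h1 h2
  have hp0n : p0 < arr.length := by rw [portA_length] at h1; exact h1
  -- B side
  have hB : (nextLessOrEqualIndex_alt arr)[p0] = pvBest arr (p0 : Int) := by
    rw [List.getElem_of_eq (portB_eq arr) h2, List.getElem_map, PySem.List.getElem_pyRange_one]
    norm_num
  -- A side
  have hmemp : ((p0 : Int)) ∈ pvS arr := (pvS_mem arr _).mpr ⟨by omega, by exact_mod_cast hp0n⟩
  obtain ⟨k0, hk0, hk⟩ := List.mem_iff_getElem.mp hmemp
  have hvk : pvV (pvS arr) (k0 : Int) = (p0 : Int) := by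
    rw [pvV_eq_getElem (pvS arr) _ (by omega) (by exact_mod_cast hk0)]
    simpa using hk
  have hA : (nextLessOrEqualIndex arr)[p0] = pvFg (pvS arr) (k0 : Int) := by
    have := pvFinal (pvS arr) (pvS_hs arr) (pvS_nodup arr) (k0 : Int) (by omega)
      (by exact_mod_cast hk0)
    rw [hvk] at this
    simp only [Int.toNat_natCast] at this
    rw [← portA_eq] at this
    exact (List.getD_eq_getElem (nextLessOrEqualIndex arr) 0 h1).symm.trans this
  rw [hA, hB]
  have hmemiff : ∀ x : Int, x ∈ pvS arr ↔ 0 ≤ x ∧ x < (arr.length : Int) := by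
    intro x
    rw [pvS_mem]
  have hFgBest := pvFg_isBest arr (pvS arr) (pvS_length arr) hmemiff (pvS_nodup arr)
    (pvS_pairwise arr) (k0 : Int) (by omega) (by exact_mod_cast hk0)
  rw [hvk] at hFgBest
  exact pvIsBest_unique arr (p0 : Int) _ _ (by omega) hFgBest
    (pvBest_isBest arr (p0 : Int) (by omega) (by exact_mod_cast hp0n))

-- ===== VERDICT (by name: the statement is the Claim_ definition above) =====
theorem nextLessOrEqualIndex_spec : Claim_equal_nextLessOrEqualIndex := by
  intro arr _
  unfold Spec_nextLessOrEqualIndex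
  exact pvMain arr
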